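-- pv_equiv track=rewrite | github.com/udavdasha/alnalyser | modules_and_scripts/udav_align.py | get_motif_std_color
-- ===== SOURCE A (Python) =====
-- def get_motif_std_color(motif):
--     color = None
--     aa_groups_colors = {"LVIAM" : "(102,102,102)", "KR": "(0,0,255)", "DE" : "(255,0,0)",
--                         "NQ" : "(255,102,0)", "STC" : "(128,128,0)", "H": "(0,255,255)", "G": "(0,255,0)",
--                         "FYW" : "(85,0,212)", "P" : "(0,128,0)", "-" : "(0,0,0)"}
--     for letter in motif:
--         for group in aa_groups_colors.keys():
--             if letter in group:
--                 if (color != None) and (aa_groups_colors[group] != color):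
--                     print ("Warning: color for the motif '%s' is unstable! Previous: %s, new: %s" % (motif, color, aa_groups_colors[group]))
--                 color = aa_groups_colors[group]
--     if color == None:
--         color = "(255,255,255)"
--     return color
-- ===== SOURCE B (Python) =====
-- _ALPHABET = "LVIAMKRDENQSTCHGFYWP-"
-- _COLORS = (["(102,102,102)"] * 5 + ["(0,0,255)"] * 2 + ["(255,0,0)"] * 2 +
--            ["(255,102,0)"] * 2 + ["(128,128,0)"] * 3 + ["(0,255,255)", "(0,255,0)"] +
--            ["(85,0,212)"] * 3 + ["(0,128,0)", "(0,0,0)"])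
--
-- def get_motif_std_color(motif):
--     # warnings: collect the matched colors once, then compare each to its predecessor
--     matched = [_COLORS[_ALPHABET.index(ch)] for ch in motif if ch in _ALPHABET]
--     for prev, cur in zip(matched, matched[1:]):
--         if cur != prev:
--             print ("Warning: color for the motif '%s' is unstable! Previous: %s, new: %s" % (motif, prev, cur))
--     # result: only the last classified letter matters -- scan from the right, first hit wins
--     for ch in reversed(motif):
--         i = _ALPHABET.find(ch)
--         if i >= 0:
--             return _COLORS[i]
--     return "(255,255,255)"
-- ===== Notes on version B (the rewrite author's own statement) =====
-- stated objective: faster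
-- what changed: Replaces A's forward last-match-wins accumulator over a group->color dict by a flat alphabet string with a parallel color table: the result is found by scanning the motif from the RIGHT and returning at the first classified letter (early exit, no accumulator), while the warnings are emitted in a separate staged pass that first collects the matched colors and then compares each to its predecessor.
import Mathlib
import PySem

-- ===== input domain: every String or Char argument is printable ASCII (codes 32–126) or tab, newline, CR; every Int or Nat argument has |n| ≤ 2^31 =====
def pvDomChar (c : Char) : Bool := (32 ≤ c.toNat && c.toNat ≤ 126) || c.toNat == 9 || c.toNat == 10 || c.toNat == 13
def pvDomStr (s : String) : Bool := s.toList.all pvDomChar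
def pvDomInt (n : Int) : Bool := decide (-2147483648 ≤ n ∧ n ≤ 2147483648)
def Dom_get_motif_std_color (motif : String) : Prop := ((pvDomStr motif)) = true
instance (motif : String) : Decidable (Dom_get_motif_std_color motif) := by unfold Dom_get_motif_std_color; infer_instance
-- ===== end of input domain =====

-- B replaces A's forward last-match-wins accumulator over the group->color dict by a flat
-- alphabet + parallel color table and finds the result by a right-to-left early-exit scan
-- (objective: alternative). The Python warnings are prints (side effects); the theorems
-- below are about the RETURN value only (both Pythons print identical warnings).

-- ===== PORT A =====
-- the group→color table, keys as their character lists ('letter in group' is a char test)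
def pvGroups : List (List Char × String) :=
  [(['L', 'V', 'I', 'A', 'M'], "(102,102,102)"),
   (['K', 'R'], "(0,0,255)"),
   (['D', 'E'], "(255,0,0)"),
   (['N', 'Q'], "(255,102,0)"),
   (['S', 'T', 'C'], "(128,128,0)"),
   (['H'], "(0,255,255)"),
   (['G'], "(0,255,0)"),
   (['F', 'Y', 'W'], "(85,0,212)"),
   (['P'], "(0,128,0)"),
   (['-'], "(0,0,0)")]

-- for letter in motif: for group in keys: if letter in group: (warn;) color = colors[group]
def get_motif_std_color (motif : String) : String :=
  let color : Option String :=
    motif.toList.foldl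
      (fun color letter =>
        pvGroups.foldl
          (fun c gv => if gv.1.contains letter then some gv.2 else c) color)
      none
  match color with
  | none => "(255,255,255)"
  | some c => c

-- ===== PORT B =====
-- _ALPHABET = "LVIAMKRDENQSTCHGFYWP-" and the parallel per-letter color table _COLORS
def pvAlpha : List Char :=
  ['L', 'V', 'I', 'A', 'M', 'K', 'R', 'D', 'E', 'N', 'Q', 'S', 'T', 'C', 'H', 'G', 'F', 'Y', 'W', 'P', '-']

def pvColors : List String :=
  ["(102,102,102)", "(102,102,102)", "(102,102,102)", "(102,102,102)", "(102,102,102)",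
   "(0,0,255)", "(0,0,255)", "(255,0,0)", "(255,0,0)", "(255,102,0)", "(255,102,0)",
   "(128,128,0)", "(128,128,0)", "(128,128,0)", "(0,255,255)", "(0,255,0)",
   "(85,0,212)", "(85,0,212)", "(85,0,212)", "(0,128,0)", "(0,0,0)"]

-- 'for ch in reversed(motif): i = _ALPHABET.find(ch); if i >= 0: return _COLORS[i]'
-- (Python's find returns -1 when absent; here idxOf returns the length, so the test
-- 'i >= 0' is exactly 'idxOf < length'). The warning pass of Source B only prints, so it
-- contributes nothing to the return value and is not ported.
def pvRevScan : List Char → String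
  | [] => "(255,255,255)"
  | ch :: rest =>
      let i := pvAlpha.idxOf ch
      if i < pvAlpha.length then pvColors.getD i "" else pvRevScan rest

def get_motif_std_color_alt (motif : String) : String :=
  pvRevScan motif.toList.reverse

-- ===== PRECONDITION & SPEC =====
def Spec_get_motif_std_color (motif : String) (out : String) : Prop := out = get_motif_std_color_alt motif
instance (motif : String) (out : String) : Decidable (Spec_get_motif_std_color motif out) := by unfold Spec_get_motif_std_color; infer_instance

-- ===== CLAIM (what is proved, stated in full; the proofs are below) =====
def Claim_equal_get_motif_std_color : Prop := ∀ (motif : String), Dom_get_motif_std_color motif → Spec_get_motif_std_color motif (get_motif_std_color motif)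

-- ===== LEMMAS AND PROOFS =====

-- A's inner scan over the group table, as a function of one letter
def pvInner (letter : Char) (color : Option String) : Option String :=
  pvGroups.foldl (fun c gv => if gv.1.contains letter then some gv.2 else c) color

-- B's per-letter classifier, as an Option (some = the letter is in the alphabet)
def pvLook (ch : Char) : Option String :=
  if pvAlpha.idxOf ch < pvAlpha.length then some (pvColors.getD (pvAlpha.idxOf ch) "") else none

-- the 'overwrite on match' fold only reads the incoming value when nothing matches
theorem pvFoldIf_shift {α : Type} (gs : List (α × String)) (p : α × String → Bool)
    (color : Option String) :
    gs.foldl (fun c gv => if p gv then some gv.2 else c) color =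
      match gs.foldl (fun c gv => if p gv then some gv.2 else c) none with
      | none => color
      | some v => some v := by
  induction gs generalizing color with
  | nil => rfl
  | cons g rest ih =>
    simp only [List.foldl]
    by_cases h : p g
    · simp only [h, if_true]
      rw [ih (some g.2)]
      cases rest.foldl (fun c gv => if p gv then some gv.2 else c) none <;> rfl
    · simp only [h, if_neg Bool.false_ne_true]
      exact ih color

theorem pvInner_shift (letter : Char) (color : Option String) :
    pvInner letter color =
      match pvInner letter none with
      | none => color
      | some v => some v :=
  pvFoldIf_shift pvGroups _ color

-- A's per-letter result equals B's alphabet classifier (the groups are pairwise disjoint)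
theorem pvInner_eq_look (letter : Char) :
    pvInner letter none = pvLook letter := by
  by_cases h1 : letter = 'L'; · subst h1; decide
  by_cases h2 : letter = 'V'; · subst h2; decide
  by_cases h3 : letter = 'I'; · subst h3; decide
  by_cases h4 : letter = 'A'; · subst h4; decide
  by_cases h5 : letter = 'M'; · subst h5; decide
  by_cases h6 : letter = 'K'; · subst h6; decide
  by_cases h7 : letter = 'R'; · subst h7; decide
  by_cases h8 : letter = 'D'; · subst h8; decide
  by_cases h9 : letter = 'E'; · subst h9; decide
  by_cases h10 : letter = 'N'; · subst h10; decide
  by_cases h11 : letter = 'Q'; · subst h11; decide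
  by_cases h12 : letter = 'S'; · subst h12; decide
  by_cases h13 : letter = 'T'; · subst h13; decide
  by_cases h14 : letter = 'C'; · subst h14; decide
  by_cases h15 : letter = 'H'; · subst h15; decide
  by_cases h16 : letter = 'G'; · subst h16; decide
  by_cases h17 : letter = 'F'; · subst h17; decide
  by_cases h18 : letter = 'Y'; · subst h18; decide
  by_cases h19 : letter = 'W'; · subst h19; decide
  by_cases h20 : letter = 'P'; · subst h20; decide
  by_cases h21 : letter = '-'; · subst h21; decide
  have hmem : letter ∉ pvAlpha := by
    simp [pvAlpha, h1, h2, h3, h4, h5, h6, h7, h8, h9, h10, h11, h12, h13, h14,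
          h15, h16, h17, h18, h19, h20, h21]
  have hb : pvLook letter = none := by
    simp [pvLook, List.idxOf_eq_length_iff.mpr hmem]
  rw [hb]
  simp only [pvInner, pvGroups, List.foldl, List.contains_cons, List.contains_nil]
  simp [h1, h2, h3, h4, h5, h6, h7, h8, h9, h10, h11, h12, h13, h14, h15, h16, h17,
        h18, h19, h20, h21, Ne.symm]

-- A's forward last-match-wins fold = first match of the reversed letter list
theorem pvFold_rev (L : List Char) (color : Option String) :
    L.foldl (fun c letter => pvInner letter c) color =
      match L.reverse.findSome? pvLook with
      | none => color
      | some v => some v := by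
  induction L generalizing color with
  | nil => rfl
  | cons c rest ih =>
    simp only [List.foldl, List.reverse_cons, List.findSome?_append]
    rw [ih (pvInner c color)]
    cases h : rest.reverse.findSome? pvLook with
    | some v => rfl
    | none =>
      rw [pvInner_shift, pvInner_eq_look]
      cases hc : pvLook c <;> simp [hc, List.findSome?]

-- B's right-to-left early-exit scan = first match of its letter list
theorem pvRevScan_eq (R : List Char) :
    pvRevScan R =
      match R.findSome? pvLook with
      | none => "(255,255,255)"
      | some v => v := by
  induction R with
  | nil => rfl
  | cons c rest ih =>
    simp only [pvRevScan, List.findSome?]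
    by_cases h : pvAlpha.idxOf c < pvAlpha.length
    · simp [pvLook, h]
    · simp [pvLook, h, ih]

-- ===== VERDICT (by name: the statement is the Claim_ definition above) =====
theorem get_motif_std_color_spec : Claim_equal_get_motif_std_color := by
  intro motif _
  unfold Spec_get_motif_std_color get_motif_std_color get_motif_std_color_alt
  simp only []
  rw [show (fun (color : Option String) letter =>
        pvGroups.foldl (fun c gv => if gv.1.contains letter then some gv.2 else c) color)
      = fun color letter => pvInner letter color from rfl]
  rw [pvFold_rev, pvRevScan_eq]
  cases motif.toList.reverse.findSome? pvLook <;> rfl
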